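-- pv_equiv track=rewrite | github.com/AkselSukub/algoritm6 | prog/proalg1.py | pointscover1
-- ===== SOURCE A (Python) =====
-- def pointscover1(s):
--     segment = []
--     while (len(s) > 0):
--         xm = min(s)
--         segment.append([xm, xm+1])
--         i = 0
--         while i < len(s):
--             if segment[-1][0] <= s[i] <= segment[-1][1]:
--                 s.pop(i)
--             else:
--                 i += 1
--     return segment
-- ===== SOURCE B (Python) =====
-- def pointscover1(s):
--     # Note: unlike A, B does not mutate s (A empties it); return value is the same.
--     segments = []
--     end = None
--     for p in sorted(s):
--         if end is None or p > end:
--             segments.append([p, p + 1])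
--             end = p + 1
--     return segments
-- ===== Notes on version B (the rewrite author's own statement) =====
-- stated objective: faster
-- what changed: Replaced the repeated min()+in-place pop scan over the remaining points by one sort followed by a single linear sweep that opens a unit segment whenever a point lies past the current segment end.
import Mathlib
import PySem

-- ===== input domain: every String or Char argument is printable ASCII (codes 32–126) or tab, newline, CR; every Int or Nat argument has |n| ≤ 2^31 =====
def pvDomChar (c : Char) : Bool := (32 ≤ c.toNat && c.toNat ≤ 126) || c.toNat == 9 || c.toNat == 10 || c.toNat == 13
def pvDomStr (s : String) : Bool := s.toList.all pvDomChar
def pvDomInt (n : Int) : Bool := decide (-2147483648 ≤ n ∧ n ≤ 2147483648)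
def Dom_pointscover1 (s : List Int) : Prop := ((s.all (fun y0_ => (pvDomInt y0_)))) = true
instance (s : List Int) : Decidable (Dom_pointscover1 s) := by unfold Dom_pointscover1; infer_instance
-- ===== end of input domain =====

-- B replaces A's repeated min()+pop passes by sort-once + one linear sweep (asymptotically
-- faster); A empties its argument list in place, B leaves it untouched — the equivalence
-- proved here is about the return value only.

-- ===== PORT A =====
-- inner while: scan with index i, popping s[i] when it lies in [lo, hi], else i += 1;
-- step for step this keeps exactly the elements outside [lo, hi], in order.
def pcInner (lo hi : Int) : List Int → List Int
  | [] => []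
  | x :: xs => if lo ≤ x ∧ x ≤ hi then pcInner lo hi xs else x :: pcInner lo hi xs

theorem pcInner_eq_filter (lo hi : Int) (l : List Int) :
    pcInner lo hi l = l.filter (fun x => decide ¬(lo ≤ x ∧ x ≤ hi)) := by
  induction l with
  | nil => rfl
  | cons x xs ih =>
    by_cases h : lo ≤ x ∧ x ≤ hi
    · have hd : ¬ ((decide ¬(lo ≤ x ∧ x ≤ hi)) = true) := by simpa using h
      rw [pcInner, if_pos h, ih, List.filter_cons, if_neg hd]
    · have hd : (decide ¬(lo ≤ x ∧ x ≤ hi)) = true := by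
        simp only [decide_eq_true_eq]; exact h
      rw [pcInner, if_neg h, ih, List.filter_cons, if_pos hd]

theorem pcInner_length_lt (lo hi : Int) (l : List Int) (x : Int)
    (hx : x ∈ l) (h1 : lo ≤ x) (h2 : x ≤ hi) :
    (pcInner lo hi l).length < l.length := by
  rw [pcInner_eq_filter]
  refine List.length_filter_lt_length_iff_exists.mpr ?_
  exact ⟨x, hx, by simp [h1, h2]⟩

-- outer while: take the min, append the unit segment, remove the covered points.
def pcOuter (s : List Int) (seg : List (List Int)) : List (List Int) :=
  if 0 < s.length then
    match hm : PySem.List.min? s (fun x => x) with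
    | some xm => pcOuter (pcInner xm (xm + 1) s) (seg ++ [[xm, xm + 1]])
    | none => seg    -- unreachable: min? = none only on the empty list
  else seg
  termination_by s.length
  decreasing_by
    exact pcInner_length_lt _ _ _ _ (PySem.List.min?_mem hm) le_rfl (by omega)

def pointscover1 (s : List Int) : List (List Int) := pcOuter s []

-- ===== PORT B =====
-- sort once; one pass keeping (segments, current segment end).
def pointscover1_alt (s : List Int) : List (List Int) :=
  ((PySem.List.sorted s (fun x => x) false).foldl
    (fun st p =>
      match st.2 with
      | none => (st.1 ++ [[p, p + 1]], some (p + 1))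
      | some e => if e < p then (st.1 ++ [[p, p + 1]], some (p + 1)) else st)
    ([], none)).1

-- ===== PRECONDITION & SPEC =====
def Spec_pointscover1 (s : List Int) (out : List (List Int)) : Prop := out = pointscover1_alt s
instance (s : List Int) (out : List (List Int)) : Decidable (Spec_pointscover1 s out) := by unfold Spec_pointscover1; infer_instance

-- ===== CLAIM (what is proved, stated in full; the proofs are below) =====
def Claim_equal_pointscover1 : Prop := ∀ (s : List Int), Dom_pointscover1 s → Spec_pointscover1 s (pointscover1 s)

-- ===== LEMMAS AND PROOFS =====

-- proof-side form of A's loop: cons instead of accumulator append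
def pcF (s : List Int) : List (List Int) :=
  if 0 < s.length then
    match hm : PySem.List.min? s (fun x => x) with
    | some xm => [xm, xm + 1] :: pcF (pcInner xm (xm + 1) s)
    | none => []
  else []
  termination_by s.length
  decreasing_by
    exact pcInner_length_lt _ _ _ _ (PySem.List.min?_mem hm) le_rfl (by omega)

theorem pcOuter_eq_append (s : List Int) (seg : List (List Int)) :
    pcOuter s seg = seg ++ pcF s := by
  by_cases h : 0 < s.length
  · rw [pcOuter, pcF]
    simp only [h, if_true]
    rcases hm : PySem.List.min? s (fun x => x) with _ | xm
    · simp
    · have := pcOuter_eq_append (pcInner xm (xm + 1) s) (seg ++ [[xm, xm + 1]])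
      simp [this]
  · rw [pcOuter, pcF]; simp [h]
  termination_by s.length
  decreasing_by
    exact pcInner_length_lt _ _ _ _ (PySem.List.min?_mem hm) le_rfl (by omega)

-- proof-side form of B's sweep, without the accumulator
def sweep : Option Int → List Int → List (List Int)
  | _, [] => []
  | none, x :: xs => [x, x + 1] :: sweep (some (x + 1)) xs
  | some e, x :: xs => if e < x then [x, x + 1] :: sweep (some (x + 1)) xs else sweep (some e) xs

theorem foldl_eq_sweep (u : List Int) (out : List (List Int)) (e : Option Int) :
    (u.foldl
      (fun st p =>
        match st.2 with
        | none => (st.1 ++ [[p, p + 1]], some (p + 1))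
        | some e => if e < p then (st.1 ++ [[p, p + 1]], some (p + 1)) else st)
      (out, e)).1 = out ++ sweep e u := by
  induction u generalizing out e with
  | nil => simp [sweep]
  | cons x xs ih =>
    rcases e with _ | e
    · simp [sweep, ih]
    · by_cases h : e < x <;> simp [sweep, h, ih]

-- skipped points below e do not affect a sweep whose current end is ≥ e
theorem sweep_filter_absorb (xs : List Int) (e e' : Int) (h : e ≤ e') :
    sweep (some e') (xs.filter (fun y => decide (e < y))) = sweep (some e') xs := by
  induction xs generalizing e' with
  | nil => rfl
  | cons y ys ih =>
    by_cases hy : e < y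
    · by_cases h2 : e' < y
      · simp [sweep, hy, h2, ih (y + 1) (by omega)]
      · simp [sweep, hy, h2, ih e' h]
    · have h2 : ¬ e' < y := by omega
      simp [sweep, hy, h2, ih e' h]

theorem sweep_some_eq_filter (xs : List Int) (e : Int) :
    sweep (some e) xs = sweep none (xs.filter (fun y => decide (e < y))) := by
  induction xs with
  | nil => rfl
  | cons x ys ih =>
    by_cases h : e < x
    · simp only [List.filter_cons, h, decide_true, if_true, sweep]
      rw [sweep_filter_absorb ys e (x + 1) (by omega)]
    · simp [sweep, h, ih]

theorem pcInner_eq_gt_filter (lo hi : Int) (l : List Int) (hall : ∀ x ∈ l, lo ≤ x) :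
    pcInner lo hi l = l.filter (fun x => decide (hi < x)) := by
  rw [pcInner_eq_filter]
  refine List.filter_congr ?_
  intro x hx
  have := hall x hx
  by_cases h : hi < x <;> simp <;> omega

theorem pcF_eq_sweep_sorted (s : List Int) :
    pcF s = sweep none (PySem.List.sorted s (fun x => x) false) := by
  by_cases h : 0 < s.length
  · have hne : s ≠ [] := by cases s <;> simp_all
    rcases hm : PySem.List.min? s (fun x => x) with _ | xm
    · exact absurd (((PySem.List.min?_eq_none_iff _ _).mp hm)) hne
    rcases hs : PySem.List.sorted s (fun x => x) false with _ | ⟨m, t⟩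
    · exact absurd (((PySem.List.sorted_eq_nil_iff _ _ _).mp hs)) hne
    -- the sorted head is the min value
    have hmemm : m ∈ s := by
      have := PySem.List.mem_sorted (xs := s) (key := fun x => x) (rev := false) (x := m)
      rw [hs] at this; simp at this; exact this
    have hle : ∀ y ∈ s, m ≤ y := PySem.List.key_head_sorted_le _ _ hs
    have hxmle : ∀ y ∈ s, xm ≤ y := PySem.List.min?_isMin hm
    have hxm_mem : xm ∈ s := PySem.List.min?_mem hm
    have hmx : m = xm := le_antisymm (hle xm hxm_mem) (hxmle m hmemm)
    subst hmx
    -- sorted tail facts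
    have hpw : (m :: t).Pairwise (fun a b => a ≤ b) := by
      have := PySem.List.sorted_pairwise (xs := s) (key := fun x => x)
      rw [hs] at this; exact this
    have htge : ∀ x ∈ t, m ≤ x := (List.pairwise_cons.mp hpw).1
    have htpw : t.Pairwise (fun a b : Int => a ≤ b) := (List.pairwise_cons.mp hpw).2
    -- sorted of the filtered list = filter of the sorted list
    have hperm : (pcInner m (m + 1) (m :: t)).Perm (pcInner m (m + 1) s) := by
      rw [pcInner_eq_filter, pcInner_eq_filter]
      exact (List.Perm.filter _ (by rw [← hs]; exact PySem.List.sorted_perm ..))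
    have hpwf : (pcInner m (m + 1) (m :: t)).Pairwise (fun a b : Int => a ≤ b) := by
      rw [pcInner_eq_filter]; exact List.Pairwise.sublist List.filter_sublist hpw
    have hsortf : PySem.List.sorted (pcInner m (m + 1) s) (fun x => x) false
        = pcInner m (m + 1) (m :: t) :=
      PySem.List.sorted_id_eq_of_perm_of_pairwise _ _ hperm hpwf
    -- head removed, tail filter simplifies to "> m+1"
    have hhead : pcInner m (m + 1) (m :: t) = t.filter (fun y => decide (m + 1 < y)) := by
      rw [show pcInner m (m + 1) (m :: t) = pcInner m (m + 1) t by
        simp [pcInner, show m ≤ m ∧ m ≤ m + 1 by omega]]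
      exact pcInner_eq_gt_filter _ _ _ htge
    have ih := pcF_eq_sweep_sorted (pcInner m (m + 1) s)
    rw [pcF]
    simp only [h, if_true]
    split
    · next xm hm2 =>
        rw [hm] at hm2
        obtain rfl : m = xm := by injection hm2
        rw [ih, hsortf, hhead, ← sweep_some_eq_filter]
        rfl
    · next hm2 =>
        rw [hm] at hm2
        simp at hm2
  · have hne : s = [] := by cases s <;> simp_all
    subst hne
    rw [pcF]; rfl
  termination_by s.length
  decreasing_by
    exact pcInner_length_lt _ _ _ _ (PySem.List.min?_mem hm) le_rfl (by omega)

-- ===== VERDICT (by name: the statement is the Claim_ definition above) =====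
theorem pointscover1_spec : Claim_equal_pointscover1 := by
  intro s _
  unfold Spec_pointscover1 pointscover1 pointscover1_alt
  rw [pcOuter_eq_append, foldl_eq_sweep, pcF_eq_sweep_sorted]
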